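-- pv_equiv track=rewrite | github.com/SahanWeerasiri/web-domain-scanner | src/modules/domain_enumeration/dns_enumeration_module/dns_enumeration.py | _analyze_txt_records
-- ===== SOURCE A (Python) =====
-- from typing import Dict, List, Set, Any, Optional
--
-- def _analyze_txt_records(txt_records: List[str]) -> Dict[str, List[str]]:
--     """Analyze TXT records for common configurations"""
--     analysis = {
--         'spf': [txt for txt in txt_records if txt.lower().startswith('v=spf')],
--         'dmarc': [txt for txt in txt_records if txt.lower().startswith('v=dmarc')],
--         'dkim': [txt for txt in txt_records if 'dkim' in txt.lower()],
--         'verification': [txt for txt in txt_records if any(v in txt.lower()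
--                         for v in ['google-site-verification', 'facebook-domain-verification'])],
--         'other': []
--     }
--
--     # Categorize remaining records
--     categorized = set()
--     for category in ['spf', 'dmarc', 'dkim', 'verification']:
--         categorized.update(analysis[category])
--
--     analysis['other'] = [txt for txt in txt_records if txt not in categorized]
--
--     return analysis
-- ===== SOURCE B (Python) =====
-- def _analyze_txt_records(txt_records):
--     """Single pass: classify each record once with independent checks."""
--     spf, dmarc, dkim, verification, other = [], [], [], [], []
--     for txt in txt_records:
--         low = txt.lower()
--         m_spf = low.startswith('v=spf')
--         m_dmarc = low.startswith('v=dmarc')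
--         m_dkim = 'dkim' in low
--         m_ver = ('google-site-verification' in low
--                  or 'facebook-domain-verification' in low)
--         if m_spf:
--             spf.append(txt)
--         if m_dmarc:
--             dmarc.append(txt)
--         if m_dkim:
--             dkim.append(txt)
--         if m_ver:
--             verification.append(txt)
--         if not (m_spf or m_dmarc or m_dkim or m_ver):
--             other.append(txt)
--     return {'spf': spf, 'dmarc': dmarc, 'dkim': dkim,
--             'verification': verification, 'other': other}
-- ===== Notes on version B (the rewrite author's own statement) =====
-- stated objective: faster
-- what changed: Replaces five separate list comprehensions plus a set-difference pass over the input with one single loop that lowercases each record once and classifies it with independent boolean checks, using a matched flag instead of the 'categorized' set.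
import Mathlib
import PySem

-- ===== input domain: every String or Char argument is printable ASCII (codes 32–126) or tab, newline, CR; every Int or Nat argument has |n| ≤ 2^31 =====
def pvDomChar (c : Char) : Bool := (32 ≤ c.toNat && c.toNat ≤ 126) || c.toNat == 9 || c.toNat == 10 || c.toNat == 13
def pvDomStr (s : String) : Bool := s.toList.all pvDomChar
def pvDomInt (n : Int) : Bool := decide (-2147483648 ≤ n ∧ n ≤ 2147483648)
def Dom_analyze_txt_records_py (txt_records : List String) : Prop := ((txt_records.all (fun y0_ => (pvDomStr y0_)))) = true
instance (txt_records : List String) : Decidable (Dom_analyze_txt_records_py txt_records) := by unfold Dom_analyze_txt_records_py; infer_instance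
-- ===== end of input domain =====

-- B replaces A's five comprehensions + set-difference pass with one loop that
-- lowercases each record once and classifies it with independent checks (objective: faster, constant-factor).

-- ===== PORT A =====
def analyze_txt_records_py (txt_records : List String) : List (String × List String) :=
  let spf := txt_records.filter (fun txt => PySem.Str.startswith (PySem.Str.lower txt) "v=spf")
  let dmarc := txt_records.filter (fun txt => PySem.Str.startswith (PySem.Str.lower txt) "v=dmarc")
  let dkim := txt_records.filter (fun txt => PySem.Str.isIn "dkim" (PySem.Str.lower txt))
  let verification := txt_records.filter (fun txt =>
    ["google-site-verification", "facebook-domain-verification"].any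
      (fun v => PySem.Str.isIn v (PySem.Str.lower txt)))
  -- categorized = set(); categorized.update(analysis[cat]) for the four categories
  let categorized : PySem.Set String :=
    PySem.Set.update (PySem.Set.update (PySem.Set.update (PySem.Set.update PySem.Set.empty spf) dmarc) dkim) verification
  let other := txt_records.filter (fun txt => !(PySem.Set.contains categorized txt))
  [("spf", spf), ("dmarc", dmarc), ("dkim", dkim), ("verification", verification), ("other", other)]

-- ===== PORT B =====
-- the single for-loop of Source B, as a left fold over the five accumulator lists
def pvAltStep (acc : List String × List String × List String × List String × List String)
    (txt : String) : List String × List String × List String × List String × List String :=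
  let (spf, dmarc, dkim, verification, other) := acc
  let low := PySem.Str.lower txt
  let mSpf := PySem.Str.startswith low "v=spf"
  let mDmarc := PySem.Str.startswith low "v=dmarc"
  let mDkim := PySem.Str.isIn "dkim" low
  let mVer := PySem.Str.isIn "google-site-verification" low || PySem.Str.isIn "facebook-domain-verification" low
  ((if mSpf then spf ++ [txt] else spf),
   (if mDmarc then dmarc ++ [txt] else dmarc),
   (if mDkim then dkim ++ [txt] else dkim),
   (if mVer then verification ++ [txt] else verification),
   (if !(mSpf || mDmarc || mDkim || mVer) then other ++ [txt] else other))

def analyze_txt_records_py_alt (txt_records : List String) : List (String × List String) :=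
  let (spf, dmarc, dkim, verification, other) := txt_records.foldl pvAltStep ([], [], [], [], [])
  [("spf", spf), ("dmarc", dmarc), ("dkim", dkim), ("verification", verification), ("other", other)]

-- ===== PRECONDITION & SPEC =====
def Spec_analyze_txt_records_py (txt_records : List String) (out : List (String × List String)) : Prop := out = analyze_txt_records_py_alt txt_records
instance (txt_records : List String) (out : List (String × List String)) : Decidable (Spec_analyze_txt_records_py txt_records out) := by unfold Spec_analyze_txt_records_py; infer_instance

-- ===== CLAIM (what is proved, stated in full; the proofs are below) =====
def Claim_equal_analyze_txt_records_py : Prop := ∀ (txt_records : List String), Dom_analyze_txt_records_py txt_records → Spec_analyze_txt_records_py txt_records (analyze_txt_records_py txt_records)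

-- ===== LEMMAS AND PROOFS =====

-- abbreviations for the four match predicates (proof-side only)
def pvP1 (t : String) : Bool := PySem.Str.startswith (PySem.Str.lower t) "v=spf"
def pvP2 (t : String) : Bool := PySem.Str.startswith (PySem.Str.lower t) "v=dmarc"
def pvP3 (t : String) : Bool := PySem.Str.isIn "dkim" (PySem.Str.lower t)
def pvP4 (t : String) : Bool :=
  PySem.Str.isIn "google-site-verification" (PySem.Str.lower t) ||
  PySem.Str.isIn "facebook-domain-verification" (PySem.Str.lower t)

-- B's fold computes the four filters and the complement filter
theorem pvAlt_loop (xs : List String) (s d k v o : List String) :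
    xs.foldl pvAltStep (s, d, k, v, o) =
      (s ++ xs.filter pvP1, d ++ xs.filter pvP2, k ++ xs.filter pvP3, v ++ xs.filter pvP4,
       o ++ xs.filter (fun t => !(pvP1 t || pvP2 t || pvP3 t || pvP4 t))) := by
  induction xs generalizing s d k v o with
  | nil => simp
  | cons x xs ih =>
    rw [List.foldl_cons,
      show pvAltStep (s, d, k, v, o) x =
        ((if pvP1 x then s ++ [x] else s), (if pvP2 x then d ++ [x] else d),
         (if pvP3 x then k ++ [x] else k), (if pvP4 x then v ++ [x] else v),
         (if !(pvP1 x || pvP2 x || pvP3 x || pvP4 x) then o ++ [x] else o)) from rfl,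
      ih]
    simp only [List.filter_cons]
    by_cases h1 : pvP1 x = true <;> by_cases h2 : pvP2 x = true <;>
      by_cases h3 : pvP3 x = true <;> by_cases h4 : pvP4 x = true <;>
        simp [h1, h2, h3, h4]

-- membership in A's 'categorized' set, for an element of the input list
theorem pv_mem_categorized (xs : List String) (t : String) (ht : t ∈ xs) :
    (t ∈ PySem.Set.update (PySem.Set.update (PySem.Set.update (PySem.Set.update PySem.Set.empty
        (xs.filter pvP1)) (xs.filter pvP2)) (xs.filter pvP3)) (xs.filter pvP4)) ↔
      (pvP1 t || pvP2 t || pvP3 t || pvP4 t) = true := by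
  simp only [PySem.Set.mem_update, PySem.Set.empty, List.mem_filter, List.not_mem_nil, false_or]
  constructor
  · rintro (((⟨_, h⟩ | ⟨_, h⟩) | ⟨_, h⟩) | ⟨_, h⟩) <;> simp [h]
  · intro h
    rcases Bool.or_eq_true_iff.mp h with h | h4
    · rcases Bool.or_eq_true_iff.mp h with h | h3
      · rcases Bool.or_eq_true_iff.mp h with h1 | h2
        · exact Or.inl (Or.inl (Or.inl ⟨ht, h1⟩))
        · exact Or.inl (Or.inl (Or.inr ⟨ht, h2⟩))
      · exact Or.inl (Or.inr ⟨ht, h3⟩)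
    · exact Or.inr ⟨ht, h4⟩

-- ===== VERDICT (by name: the statement is the Claim_ definition above) =====
theorem analyze_txt_records_py_spec : Claim_equal_analyze_txt_records_py := by
  intro xs _
  show analyze_txt_records_py xs = analyze_txt_records_py_alt xs
  unfold analyze_txt_records_py analyze_txt_records_py_alt
  rw [show (fun txt => PySem.Str.startswith (PySem.Str.lower txt) "v=spf") = pvP1 from rfl,
    show (fun txt => PySem.Str.startswith (PySem.Str.lower txt) "v=dmarc") = pvP2 from rfl,
    show (fun txt => PySem.Str.isIn "dkim" (PySem.Str.lower txt)) = pvP3 from rfl,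
    show (fun txt => ["google-site-verification", "facebook-domain-verification"].any
        (fun v => PySem.Str.isIn v (PySem.Str.lower txt))) = pvP4 from by
      funext t; simp [pvP4],
    pvAlt_loop]
  simp only [List.nil_append]
  have hother :
      xs.filter (fun txt => !(PySem.Set.contains
        (PySem.Set.update (PySem.Set.update (PySem.Set.update (PySem.Set.update PySem.Set.empty
          (xs.filter pvP1)) (xs.filter pvP2)) (xs.filter pvP3)) (xs.filter pvP4)) txt)) =
      xs.filter (fun t => !(pvP1 t || pvP2 t || pvP3 t || pvP4 t)) := by
    apply List.filter_congr
    intro t ht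
    have hmem := pv_mem_categorized xs t ht
    cases hb : (pvP1 t || pvP2 t || pvP3 t || pvP4 t) with
    | true =>
      have hc : PySem.Set.contains _ t = true := (PySem.Set.contains_iff _ t).mpr (hmem.mpr hb)
      simp only [hc]
    | false =>
      have hn : t ∉ PySem.Set.update (PySem.Set.update (PySem.Set.update (PySem.Set.update
          PySem.Set.empty (xs.filter pvP1)) (xs.filter pvP2)) (xs.filter pvP3)) (xs.filter pvP4) :=
        fun hm => by simp [hmem.mp hm] at hb
      have hc : PySem.Set.contains _ t = false :=
        Bool.eq_false_iff.mpr (fun h => hn ((PySem.Set.contains_iff _ t).mp h))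
      simp only [hc]
  rw [hother]
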